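-- pv_equiv track=rewrite | github.com/develoPHM/algorithm | programmers/Lv_1/과일 장수/과일 장수.py | solution
-- ===== SOURCE A (Python) =====
-- def solution(k, m, score):
--     score.sort(reverse=True)
--     ans = 0
--
--     if len(score) < m:
--         return 0
--     else:
--         for i in range(0,len(score), m):
--             if len(score[i:i+m]) == m:
--                 ans += min(score[i:i+m]) * m
--     return ans
-- ===== SOURCE B (Python) =====
-- def solution(k, m, score):
--     # Note: unlike A, this does not sort `score` in place; return value is identical.
--     s = sorted(score, reverse=True)
--     return m * sum(s[m - 1::m])
-- ===== Notes on version B (the rewrite author's own statement) =====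
-- stated objective: simpler
-- what changed: Replaces the explicit group loop with per-group slicing and min() scans by a single strided slice s[m-1::m] (each full group's minimum is its last element in the descending sort) summed and multiplied once; A also sorts score in place while B does not, the claim is about the return value.
-- outside the precondition, e.g. on solution(0, -1, [5, 7]): A returns 0, B returns -7; on solution(0, 0, [1]): A raises ValueError, B raises ValueError
import Mathlib
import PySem

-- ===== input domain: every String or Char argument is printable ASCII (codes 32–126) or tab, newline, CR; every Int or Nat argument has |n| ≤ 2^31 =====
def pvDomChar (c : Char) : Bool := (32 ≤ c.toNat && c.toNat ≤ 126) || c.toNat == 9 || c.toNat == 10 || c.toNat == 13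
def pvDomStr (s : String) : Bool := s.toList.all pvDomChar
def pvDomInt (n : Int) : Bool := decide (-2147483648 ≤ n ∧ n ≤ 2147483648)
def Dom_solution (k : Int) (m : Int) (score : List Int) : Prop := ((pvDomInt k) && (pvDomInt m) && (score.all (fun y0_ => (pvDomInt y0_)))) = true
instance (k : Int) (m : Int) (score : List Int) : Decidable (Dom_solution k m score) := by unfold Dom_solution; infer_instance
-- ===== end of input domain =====

-- B replaces A's per-group loop with min() scans by one strided slice s[m-1::m], summed once;
-- A sorts `score` in place while B does not: the equivalence proved here is about the return value only.
-- ===== PORT A =====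
def solution (k : Int) (m : Int) (score : List Int) : Int :=
  let s := PySem.List.sorted score (fun y => y) true
  if PySem.List.len s < m then 0
  else
    (PySem.List.pyRange 0 (PySem.List.len s) m).foldl
      (fun ans i =>
        if PySem.List.len (PySem.List.slice s (some i) (some (i + m))) = m then
          -- min(score[i:i+m]): under the guard the slice is nonempty, so min? is some; getD 0 is never used
          ans + (PySem.List.min? (PySem.List.slice s (some i) (some (i + m))) (fun y => y)).getD 0 * m
        else ans) 0

-- ===== PORT B =====
def solution_alt (k : Int) (m : Int) (score : List Int) : Int :=
  let s := PySem.List.sorted score (fun y => y) true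
  m * ((PySem.List.slice? s (some (m - 1)) none m).getD []).sum

-- ===== PRECONDITION & SPEC =====
-- Pre_ excludes m <= 0 (a non-positive box size, outside the task's natural domain): A raises
-- ValueError at m = 0, and for m < 0 A's 0 (from an empty range) and B's strided-slice value are
-- both accidental readings of an unspecified corner.
def Pre_solution (k : Int) (m : Int) (score : List Int) : Prop := 1 ≤ m
instance (k : Int) (m : Int) (score : List Int) : Decidable (Pre_solution k m score) := by unfold Pre_solution; infer_instance
def pvWitness_solution : Int × Int × List Int := (0, 2, [4, 1, 3, 2])
def Spec_solution (k : Int) (m : Int) (score : List Int) (out : Int) : Prop := out = solution_alt k m score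
instance (k : Int) (m : Int) (score : List Int) (out : Int) : Decidable (Spec_solution k m score out) := by unfold Spec_solution; infer_instance

-- ===== CLAIM (what is proved, stated in full; the proofs are below) =====
def Claim_equal_solution : Prop := ∀ (k : Int) (m : Int) (score : List Int), Dom_solution k m score → Pre_solution k m score → Spec_solution k m score (solution k m score)

-- ===== LEMMAS AND PROOFS =====
-- min of a non-increasing list is its last element
theorem pvFoldlMinDesc (t : List Int) : ∀ x : Int, (x :: t).Pairwise (fun a b => b ≤ a) →
    t.foldl min x = t.getLastD x := by
  induction t with
  | nil => intro x _; rfl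
  | cons a t ih =>
    intro x h
    have hax : a ≤ x := (List.pairwise_cons.mp h).1 a (by simp)
    have h' : (a :: t).Pairwise (fun a b => b ≤ a) := (List.pairwise_cons.mp h).2
    simp only [List.foldl_cons, List.getLastD_cons]
    rw [min_eq_right hax]
    exact ih a h'

theorem pvMinDesc (l : List Int) (h : l.Pairwise (fun a b => b ≤ a)) :
    PySem.List.min? l (fun y => y) = l.getLast? := by
  cases l with
  | nil => rfl
  | cons x t =>
    rw [PySem.List.min?_id_cons, pvFoldlMinDesc t x h]
    cases t with
    | nil => rfl
    | cons a t => simp [List.getLast?_eq_getElem?, List.getLastD_eq_getLast?]; rfl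

theorem pvFilterRangeLt (c q : Nat) (h : q ≤ c) :
    (List.range c).filter (fun k => decide (k < q)) = List.range q := by
  obtain ⟨r, rfl⟩ := Nat.exists_eq_add_of_le h
  rw [List.range_add, List.filter_append]
  have h1 : (List.range q).filter (fun k => decide (k < q)) = List.range q := by
    apply List.filter_eq_self.mpr; intro a ha; simp at ha ⊢; omega
  have h2 : ((List.range r).map (q + ·)).filter (fun k => decide (k < q)) = [] := by
    apply List.filter_eq_nil_iff.mpr; intro a ha; simp at ha ⊢; obtain ⟨b, _, rfl⟩ := ha; omega
  rw [h1, h2, List.append_nil]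

-- B's strided slice s[m-1::m] is the list of full-group minima positions
theorem pvSliceB (d : List Int) (M : Nat) (hM : 1 ≤ M) :
    (PySem.List.slice? d (some ((M : Int) - 1)) none (M : Int)).getD [] =
      (List.range (d.length / M)).map (fun j => d.getD (M - 1 + M * j) 0) := by
  have hM0 : ((M : Int)) ≠ 0 := by omega
  simp only [PySem.List.slice?, PySem.List.sliceIndices, if_neg hM0]
  have hstep : ¬ ((M : Int) < 0) := by omega
  have hMpos : (0 : Int) < (M : Int) := by omega
  simp only [if_neg hstep, if_pos hMpos, if_neg (show ¬ ((M : Int) - 1 < 0) by omega)]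
  by_cases hc : M ≤ d.length
  · have hmin : min ((M : Int) - 1) (d.length : Int) = (M : Int) - 1 :=
      min_eq_left (by omega)
    have hlt : ((M : Int) - 1) < (d.length : Int) := by omega
    rw [hmin, if_pos hlt]
    have harith : (d.length : Int) - ((M : Int) - 1) + (M : Int) - 1 = (d.length : Int) := by ring
    rw [harith]
    have hcount : ((d.length : Int) / (M : Int)).toNat = d.length / M := by
      rw [← Int.natCast_ediv, Int.toNat_natCast]
    rw [hcount, Option.getD_some]
    have hmem : ∀ k ∈ List.range (d.length / M),
        d[(((M : Int) - 1) + (M : Int) * (k : Int)).toNat]? = some (d.getD (M - 1 + M * k) 0) := by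
      intro k hk
      have hk' : k < d.length / M := List.mem_range.mp hk
      have hidx : M - 1 + M * k < d.length := by
        have h1 : M * (k + 1) ≤ M * (d.length / M) := Nat.mul_le_mul_left M hk'
        have h2 : d.length / M * M ≤ d.length := Nat.div_mul_le_self _ _
        have h4 : M * (k + 1) = M * k + M := by ring
        have h5 : M * (d.length / M) = d.length / M * M := by ring
        omega
      have htn : (((M : Int) - 1) + (M : Int) * (k : Int)).toNat = M - 1 + M * k := by omega
      rw [htn, List.getD_eq_getElem?_getD, List.getElem?_eq_getElem hidx]
      rfl
    rw [List.filterMap_congr hmem]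
    exact List.filterMap_eq_map_iff_forall_eq_some.mpr fun x _ => rfl
  · have hmin : min ((M : Int) - 1) (d.length : Int) = (d.length : Int) :=
      min_eq_right (by omega)
    rw [hmin, if_neg (lt_irrefl _)]
    have : d.length / M = 0 := Nat.div_eq_of_lt (by omega)
    simp [this]


theorem pvFoldA (d : List Int) (hd : d.Pairwise (fun a b => b ≤ a)) (M : Nat) (hM : 1 ≤ M)
    (hMn : M ≤ d.length) :
    (PySem.List.pyRange 0 (PySem.List.len d) (M : Int)).foldl
      (fun ans i =>
        if PySem.List.len (PySem.List.slice d (some i) (some (i + (M : Int)))) = (M : Int) then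
          ans + (PySem.List.min? (PySem.List.slice d (some i) (some (i + (M : Int)))) (fun y => y)).getD 0 * (M : Int)
        else ans) 0
    = ((List.range (d.length / M)).map (fun j => d.getD (M - 1 + M * j) 0)).sum * (M : Int) := by
  have hMpos : (0 : Int) < (M : Int) := by omega
  have hlen : PySem.List.len d = (d.length : Int) := rfl
  rw [hlen, PySem.List.pyRange_of_pos 0 (d.length : Int) hMpos]
  have hpos : (0 : Int) < (d.length : Int) := by omega
  rw [if_pos hpos]
  have hcA : ((d.length : Int) - 0 + (M : Int) - 1) = ((d.length + M - 1 : Nat) : Int) := by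
    omega
  rw [hcA, ← Int.natCast_ediv, Int.toNat_natCast, List.foldl_map]
  have hbody : ∀ (acc : Int) (x : Nat), x ∈ List.range ((d.length + M - 1) / M) →
      (fun ans k =>
        if PySem.List.len (PySem.List.slice d (some (0 + (M : Int) * (k : Int)))
              (some (0 + (M : Int) * (k : Int) + (M : Int)))) = (M : Int) then
          ans + (PySem.List.min? (PySem.List.slice d (some (0 + (M : Int) * (k : Int)))
              (some (0 + (M : Int) * (k : Int) + (M : Int)))) (fun y => y)).getD 0 * (M : Int)
        else ans) acc x
      = (fun ans k =>
          if M * k + M ≤ d.length then ans + d.getD (M - 1 + M * k) 0 * (M : Int) else ans) acc x := by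
    intro acc x _
    dsimp only
    have hi : (0 : Int) + (M : Int) * (x : Int) = ((M * x : Nat) : Int) := by push_cast; ring
    rw [hi, PySem.List.slice_natCast_add d (M * x) M]
    have hlt : (PySem.List.len (List.take M (List.drop (M * x) d))) =
        ((min M (d.length - M * x) : Nat) : Int) := by
      show ((List.take M (List.drop (M * x) d)).length : Int) = _
      rw [List.length_take, List.length_drop]
    by_cases hfull : M * x + M ≤ d.length
    · have hmin : min M (d.length - M * x) = M := by omega
      rw [hlt, hmin, if_pos rfl, if_pos hfull]
      have hsub : (List.take M (List.drop (M * x) d)).Sublist d :=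
        (List.take_sublist _ _).trans (List.drop_sublist _ _)
      rw [pvMinDesc _ (hd.sublist hsub), List.getLast?_eq_getElem?]
      have hlenT : (List.take M (List.drop (M * x) d)).length = M := by
        rw [List.length_take, List.length_drop]; omega
      have hidx : M - 1 + M * x < d.length := by omega
      rw [hlenT, List.getElem?_take_of_lt (by omega : M - 1 < M), List.getElem?_drop,
        List.getD_eq_getElem?_getD]
      have : M * x + (M - 1) = M - 1 + M * x := by omega
      rw [this, List.getElem?_eq_getElem hidx]
    · have hmin : min M (d.length - M * x) ≠ M := by omega
      rw [hlt, if_neg (by exact_mod_cast fun h => hmin (by exact_mod_cast h)), if_neg hfull]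
  refine (PySem.List.foldl_congr_mem _ _ _ 0 hbody).trans ?_
  rw [PySem.List.foldl_ite_eq_foldl_filter]
  have hiff : ∀ x ∈ List.range ((d.length + M - 1) / M),
      (decide (M * x + M ≤ d.length)) = (decide (x < d.length / M)) := by
    intro x _
    apply decide_eq_decide.mpr
    rw [Nat.lt_iff_add_one_le, Nat.le_div_iff_mul_le (by omega : 0 < M)]
    have : (x + 1) * M = M * x + M := by ring
    omega
  rw [List.filter_congr hiff,
    pvFilterRangeLt _ _ (Nat.div_le_div_right (by omega : d.length ≤ d.length + M - 1)),
    PySem.List.foldl_add, zero_add, List.sum_map_mul_right]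


-- ===== VERDICT (by name: the statement is the Claim_ definition above) =====
theorem solution_spec : Claim_equal_solution := by
  intro k m score _ hpre
  unfold Pre_solution at hpre
  unfold Spec_solution solution solution_alt
  obtain ⟨M, rfl⟩ : ∃ M : Nat, m = (M : Int) := ⟨m.toNat, by omega⟩
  have hM : 1 ≤ M := by exact_mod_cast hpre
  set d := PySem.List.sorted score (fun y => y) true with hdd
  have hd : d.Pairwise (fun a b => b ≤ a) := PySem.List.sorted_pairwise_rev score (fun y => y)
  show (if PySem.List.len d < (M : Int) then (0 : Int) else _) = (M : Int) * _
  rw [pvSliceB d M hM]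
  have hlen : PySem.List.len d = (d.length : Int) := rfl
  by_cases hc : M ≤ d.length
  · rw [if_neg (by rw [hlen]; omega)]
    rw [pvFoldA d hd M hM hc, mul_comm]
  · rw [if_pos (by rw [hlen]; omega)]
    have h0 : d.length / M = 0 := Nat.div_eq_of_lt (by omega)
    simp [h0]
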